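-- pv_equiv track=rewrite | github.com/wangzelin007/Leetcode | microsoft/不重复的时间全排列.py | solution
-- ===== SOURCE A (Python) =====
-- def solution(A: int,B: int, C: int,D: int) -> int:
--     ans = []
--     s = [str(A), str(B), str(C), str(D)]
--     def _process(s, i, ans):
--         if i == 1 and s[0] > '2': return
--         if i == 2 and s[0] == '2' and s[1] > '4': return
--         if i == 3 and s[2] > '5': return
--         if len(s) == i:
--             ans.append(''.join(s))
--             return
--         visit = set()
--         for j in range(i, len(s)):
--             if s[j] not in visit:
--                 visit.add(s[j])
--                 s[i], s[j] = s[j], s[i]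
--                 _process(s, i+1, ans)
--                 s[i], s[j] = s[j], s[i]
--
--     _process(s, 0, ans)
--     return len(ans)
-- ===== SOURCE B (Python) =====
-- def solution(A: int, B: int, C: int, D: int) -> int:
--     digits = [str(A), str(B), str(C), str(D)]
--     valid = set()
--     for i in range(4):
--         for j in range(4):
--             for k in range(4):
--                 for l in range(4):
--                     if len({i, j, k, l}) == 4:
--                         p = (digits[i], digits[j], digits[k], digits[l])
--                         if p[0] <= '2' and not (p[0] == '2' and p[1] > '4') and p[2] <= '5':
--                             valid.add(p)
--     return len(valid)
-- ===== Notes on version B (the rewrite author's own statement) =====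
-- stated objective: simpler
-- what changed: A generates valid times by a pruned recursive in-place swap permutation search with a per-level visited-set; B flatly scans all 256 index quadruples, keeps the distinct index-permutations that pass the HH:MM validity predicate in a set, and returns its size.
import Mathlib
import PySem

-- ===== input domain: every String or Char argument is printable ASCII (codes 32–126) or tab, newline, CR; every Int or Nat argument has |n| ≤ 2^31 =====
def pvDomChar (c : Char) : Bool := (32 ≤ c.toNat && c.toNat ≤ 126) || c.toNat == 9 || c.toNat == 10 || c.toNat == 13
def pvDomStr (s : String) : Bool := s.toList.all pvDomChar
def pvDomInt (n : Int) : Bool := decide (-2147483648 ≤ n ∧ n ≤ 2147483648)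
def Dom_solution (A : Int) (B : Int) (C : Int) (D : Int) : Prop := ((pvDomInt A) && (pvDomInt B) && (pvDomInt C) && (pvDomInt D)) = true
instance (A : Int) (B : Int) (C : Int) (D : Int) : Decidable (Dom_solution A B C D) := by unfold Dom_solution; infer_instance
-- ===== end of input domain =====

-- B replaces A's pruned recursive swap-generation with a flat brute-force scan of all
-- 256 index quadruples, keeping the distinct valid permutations in a set (simpler, same cost).

-- ===== PORT A =====
-- 's[i], s[j] = s[j], s[i]' (both right-hand sides read the old list)
def pvSwap (s : List String) (i j : Int) : List String :=
  PySem.List.pySetD (PySem.List.pySetD s i (PySem.List.pyGetD s j "")) j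
    (PySem.List.pyGetD s i "")

-- '_process(s, i, ans)': fuel = len(s) - i in every call, so the fuel-0 fallback is never
-- taken before the 'len(s) == i' leaf; the swap-back after the recursive call is implicit
-- (the recursive call gets the swapped copy, the loop keeps using 's').
def pvProcess : Nat → List String → Int → List String → List String
  | fuel, s, i, ans =>
    if i = 1 ∧ "2" < PySem.List.pyGetD s 0 "" then ans
    else if i = 2 ∧ PySem.List.pyGetD s 0 "" = "2" ∧ "4" < PySem.List.pyGetD s 1 "" then ans
    else if i = 3 ∧ "5" < PySem.List.pyGetD s 2 "" then ans
    else if (s.length : Int) = i then ans ++ [PySem.Str.join "" s]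
    else
      match fuel with
      | 0 => ans
      | fuel + 1 =>
        ((PySem.List.pyRange i (s.length : Int) 1).foldl
          (fun (st : PySem.Set String × List String) j =>
            if st.1.contains (PySem.List.pyGetD s j "") = false then
              (st.1.add (PySem.List.pyGetD s j ""),
               pvProcess fuel (pvSwap s i j) (i + 1) st.2)
            else st)
          ((PySem.Set.empty : PySem.Set String), ans)).2

def solution (A : Int) (B : Int) (C : Int) (D : Int) : Int :=
  ((pvProcess 4 [PySem.Int.toStr A, PySem.Int.toStr B, PySem.Int.toStr C, PySem.Int.toStr D]
      0 []).length : Int)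

-- ===== PORT B =====
def solution_alt (A : Int) (B : Int) (C : Int) (D : Int) : Int :=
  let digits := [PySem.Int.toStr A, PySem.Int.toStr B, PySem.Int.toStr C, PySem.Int.toStr D]
  PySem.Set.len
    ((PySem.List.pyRange 0 4 1).foldl (fun v1 i =>
      (PySem.List.pyRange 0 4 1).foldl (fun v2 j =>
        (PySem.List.pyRange 0 4 1).foldl (fun v3 k =>
          (PySem.List.pyRange 0 4 1).foldl (fun v4 l =>
            if PySem.Set.len (PySem.Set.ofList [i, j, k, l]) = 4 then
              let p := (PySem.List.pyGetD digits i "", PySem.List.pyGetD digits j "",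
                        PySem.List.pyGetD digits k "", PySem.List.pyGetD digits l "")
              if p.1 ≤ "2" ∧ ¬ (p.1 = "2" ∧ "4" < p.2.1) ∧ p.2.2.1 ≤ "5" then
                PySem.Set.add v4 p
              else v4
            else v4) v3) v2) v1)
      (PySem.Set.empty : PySem.Set (String × String × String × String)))

-- ===== PRECONDITION & SPEC =====
def Spec_solution (A : Int) (B : Int) (C : Int) (D : Int) (out : Int) : Prop := out = solution_alt A B C D
instance (A : Int) (B : Int) (C : Int) (D : Int) (out : Int) : Decidable (Spec_solution A B C D out) := by unfold Spec_solution; infer_instance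

-- ===== CLAIM (what is proved, stated in full; the proofs are below) =====
def Claim_equal_solution : Prop := ∀ (A : Int) (B : Int) (C : Int) (D : Int), Dom_solution A B C D → Spec_solution A B C D (solution A B C D)

-- ===== LEMMAS AND PROOFS =====

def pvVal (s : List String) (j : Int) : String := PySem.List.pyGetD s j ""

-- the indices the visit-set loop actually recurses on: first occurrence of each new value
def pvSel (s : List String) : List Int → PySem.Set String → List Int
  | [], _ => []
  | j :: r, vis =>
    if vis.contains (pvVal s j) = true then pvSel s r vis
    else j :: pvSel s r (vis.add (pvVal s j))

-- ghost generator: the distinct permutations _process enumerates, without the pruning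
def pvGen : Nat → List String → Int → List (List String)
  | 0, s, _ => [s]
  | fuel + 1, s, i =>
    (pvSel s (PySem.List.pyRange i (s.length : Int) 1) PySem.Set.empty).flatMap
      (fun j => pvGen fuel (pvSwap s i j) (i + 1))

def pvC1 (t : List String) : Bool := ! decide ("2" < PySem.List.pyGetD t 0 "")
def pvC2 (t : List String) : Bool :=
  ! decide (PySem.List.pyGetD t 0 "" = "2" ∧ "4" < PySem.List.pyGetD t 1 "")
def pvC3 (t : List String) : Bool := ! decide ("5" < PySem.List.pyGetD t 2 "")

-- the pruning checks still ahead of level i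
def pvCond (i : Int) (t : List String) : Bool :=
  (if i ≤ 1 then pvC1 t else true) &&
  ((if i ≤ 2 then pvC2 t else true) && (if i ≤ 3 then pvC3 t else true))

def pvToT (t : List String) : String × String × String × String :=
  (t.getD 0 "", t.getD 1 "", t.getD 2 "", t.getD 3 "")

def pvQb (p : String × String × String × String) : Bool :=
  decide (p.1 ≤ "2" ∧ ¬ (p.1 = "2" ∧ "4" < p.2.1) ∧ p.2.2.1 ≤ "5")

def pvDistinctb (q : Int × Int × Int × Int) : Bool :=
  decide (PySem.Set.len (PySem.Set.ofList [q.1, q.2.1, q.2.2.1, q.2.2.2]) = 4)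

def pvTup (a b c d : String) (q : Int × Int × Int × Int) :
    String × String × String × String :=
  (PySem.List.pyGetD [a, b, c, d] q.1 "", PySem.List.pyGetD [a, b, c, d] q.2.1 "",
   PySem.List.pyGetD [a, b, c, d] q.2.2.1 "", PySem.List.pyGetD [a, b, c, d] q.2.2.2 "")

def pvQuads : List (Int × Int × Int × Int) :=
  ([0, 1, 2, 3] : List Int).flatMap (fun i =>
    ([0, 1, 2, 3] : List Int).flatMap (fun j =>
      ([0, 1, 2, 3] : List Int).flatMap (fun k =>
        ([0, 1, 2, 3] : List Int).map (fun l => (i, j, k, l)))))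

-- B's nested accumulation loop, as a function of the four digit strings
def pvValid (a b c d : String) : PySem.Set (String × String × String × String) :=
  let digits := [a, b, c, d]
  (PySem.List.pyRange 0 4 1).foldl (fun v1 i =>
    (PySem.List.pyRange 0 4 1).foldl (fun v2 j =>
      (PySem.List.pyRange 0 4 1).foldl (fun v3 k =>
        (PySem.List.pyRange 0 4 1).foldl (fun v4 l =>
          if PySem.Set.len (PySem.Set.ofList [i, j, k, l]) = 4 then
            let p := (PySem.List.pyGetD digits i "", PySem.List.pyGetD digits j "",
                      PySem.List.pyGetD digits k "", PySem.List.pyGetD digits l "")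
            if p.1 ≤ "2" ∧ ¬ (p.1 = "2" ∧ "4" < p.2.1) ∧ p.2.2.1 ≤ "5" then
              PySem.Set.add v4 p
            else v4
          else v4) v3) v2) v1)
    (PySem.Set.empty : PySem.Set (String × String × String × String))

def pvPerms (a b c d : String) : List (List String) :=
  [[a,b,c,d],[a,b,d,c],[a,c,b,d],[a,c,d,b],[a,d,b,c],[a,d,c,b],
   [b,a,c,d],[b,a,d,c],[b,c,a,d],[b,c,d,a],[b,d,a,c],[b,d,c,a],
   [c,a,b,d],[c,a,d,b],[c,b,a,d],[c,b,d,a],[c,d,a,b],[c,d,b,a],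
   [d,a,b,c],[d,a,c,b],[d,b,a,c],[d,b,c,a],[d,c,a,b],[d,c,b,a]]

-- ---- swap facts ----

theorem pvSwap_eq (s : List String) {i j : Int} (hi : 0 ≤ i) (hj : 0 ≤ j) :
    pvSwap s i j = (s.set i.toNat (s.getD j.toNat "")).set j.toNat (s.getD i.toNat "") := by
  unfold pvSwap
  rw [PySem.List.pyGetD_of_nonneg _ _ hj, PySem.List.pyGetD_of_nonneg _ _ hi,
    PySem.List.pySetD_of_nonneg _ _ hi, PySem.List.pySetD_of_nonneg _ _ hj]

theorem pvSwap_length (s : List String) (i j : Int) : (pvSwap s i j).length = s.length := by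
  unfold pvSwap
  simp [PySem.List.length_pySetD]

theorem pvSwap_take (s : List String) {i j : Int} (hi : 0 ≤ i) (hij : i ≤ j) :
    (pvSwap s i j).take i.toNat = s.take i.toNat := by
  have hj : 0 ≤ j := le_trans hi hij
  rw [pvSwap_eq s hi hj]
  rw [List.take_set_of_le (by omega : i.toNat ≤ j.toNat),
    List.take_set_of_le (le_refl i.toNat)]

theorem pvSwap_perm (s : List String) {i j : Int} (hi : 0 ≤ i) (hij : i ≤ j)
    (hj : j < (s.length : Int)) : (pvSwap s i j).Perm s := by
  have hj0 : 0 ≤ j := le_trans hi hij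
  have hjn : j.toNat < s.length := by omega
  have hin : i.toNat < s.length := by omega
  rw [pvSwap_eq s hi hj0]
  rw [List.getD_eq_getElem s "" hjn, List.getD_eq_getElem s "" hin]
  exact List.set_set_perm hin hjn

theorem pvSwap_drop_perm (s : List String) {i j : Int} (hi : 0 ≤ i) (hij : i ≤ j)
    (hj : j < (s.length : Int)) :
    ((pvSwap s i j).drop i.toNat).Perm (s.drop i.toNat) := by
  have hperm := pvSwap_perm s hi hij hj
  have htake := pvSwap_take s hi hij
  have h1 : ((pvSwap s i j).take i.toNat ++ (pvSwap s i j).drop i.toNat).Perm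
      (s.take i.toNat ++ s.drop i.toNat) := by
    simpa [List.take_append_drop] using hperm
  rw [htake] at h1
  exact (List.perm_append_left_iff _).mp h1

theorem pvSwap_drop_cons (s : List String) {i j : Int} (hi : 0 ≤ i) (hij : i ≤ j)
    (hj : j < (s.length : Int)) :
    (pvSwap s i j).drop i.toNat = pvVal s j :: (pvSwap s i j).drop (i.toNat + 1) := by
  have hj0 : 0 ≤ j := le_trans hi hij
  have hjn : j.toNat < s.length := by omega
  have hin : i.toNat < s.length := by omega
  have hlen : i.toNat < (pvSwap s i j).length := by rw [pvSwap_length]; exact hin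
  rw [List.drop_eq_getElem_cons hlen]
  congr 1
  simp only [pvSwap_eq s hi hj0]
  rw [List.getElem_set, List.getElem_set]
  unfold pvVal
  rw [PySem.List.pyGetD_of_nonneg _ _ hj0]
  by_cases h : j.toNat = i.toNat
  · simp [h]
  · simp [h]

-- ---- pvSel facts ----

theorem pvSel_subset {s : List String} {js : List Int} {vis : PySem.Set String} {j : Int}
    (h : j ∈ pvSel s js vis) : j ∈ js := by
  induction js generalizing vis with
  | nil => simpa [pvSel] using h
  | cons j0 r ih =>
    unfold pvSel at h
    split at h
    · exact List.mem_cons_of_mem _ (ih h)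
    · rcases List.mem_cons.mp h with h | h
      · exact h ▸ List.mem_cons_self
      · exact List.mem_cons_of_mem _ (ih h)

theorem pvSel_strong (s : List String) (js : List Int) (vis : PySem.Set String) :
    (∀ j ∈ pvSel s js vis, pvVal s j ∉ vis) ∧
      ((pvSel s js vis).map (pvVal s)).Nodup := by
  induction js generalizing vis with
  | nil => simp [pvSel]
  | cons j0 r ih =>
    unfold pvSel
    split
    · exact ih vis
    · rename_i hni
      have hni' : pvVal s j0 ∉ vis := fun hmem =>
        hni ((PySem.Set.contains_iff _ _).mpr hmem)
      obtain ⟨hfresh, hnd⟩ := ih (vis.add (pvVal s j0))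
      constructor
      · intro j hj
        rcases List.mem_cons.mp hj with rfl | hj
        · exact hni'
        · intro hmem
          exact hfresh j hj ((PySem.Set.mem_add _ _ _).mpr (Or.inl hmem))
      · rw [List.map_cons, List.nodup_cons]
        refine ⟨?_, hnd⟩
        intro hmem
        rcases List.mem_map.mp hmem with ⟨j, hj, hval⟩
        exact hfresh j hj ((PySem.Set.mem_add _ _ _).mpr (Or.inr hval))

theorem pvSel_cover (s : List String) (js : List Int) (vis : PySem.Set String) :
    ∀ j ∈ js, pvVal s j ∈ vis ∨ ∃ j' ∈ pvSel s js vis, pvVal s j' = pvVal s j := by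
  induction js generalizing vis with
  | nil => simp
  | cons j0 r ih =>
    intro j hj
    unfold pvSel
    split
    · rename_i hc
      have hc' : pvVal s j0 ∈ vis := (PySem.Set.contains_iff _ _).mp hc
      rcases List.mem_cons.mp hj with rfl | hj
      · exact Or.inl hc'
      · exact ih vis j hj
    · rcases List.mem_cons.mp hj with rfl | hj
      · exact Or.inr ⟨j, List.mem_cons_self, rfl⟩
      · rcases ih (vis.add (pvVal s j0)) j hj with hin | ⟨j', hj', hv⟩
        · rcases (PySem.Set.mem_add _ _ _).mp hin with hin | hval
          · exact Or.inl hin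
          · exact Or.inr ⟨j0, List.mem_cons_self, hval.symm⟩
        · exact Or.inr ⟨j', List.mem_cons_of_mem _ hj', hv⟩

-- ---- pvGen characterization ----

theorem pvLenEq {α : Type} {t s : List α} {p : Nat} (htake : t.take p = s.take p)
    (hdrop : (t.drop p).Perm (s.drop p)) (hp : p ≤ s.length) : t.length = s.length := by
  have h1 := congrArg List.length htake
  have h2 := hdrop.length_eq
  simp [List.length_take] at h1 h2
  omega

theorem pvGetEq {α : Type} {t s : List α} {p k : Nat} (d : α) (htake : t.take p = s.take p)
    (hk : k < p) : t.getD k d = s.getD k d := by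
  have h1 : t[k]? = (t.take p)[k]? := (List.getElem?_take_of_lt hk).symm
  have h2 : s[k]? = (s.take p)[k]? := (List.getElem?_take_of_lt hk).symm
  rw [List.getD_eq_getElem?_getD, List.getD_eq_getElem?_getD, h1, h2, htake]

theorem pvTakeSucc {α : Type} {t : List α} {p : Nat} (h : p < t.length) :
    t.take (p + 1) = t.take p ++ [t[p]] := by
  rw [List.take_succ, List.getElem?_eq_getElem h]
  rfl

theorem pvGen_spec : ∀ (fuel : Nat) (s : List String) (i : Int), 0 ≤ i →
    (s.length : Int) = i + fuel →
    (pvGen fuel s i).Nodup ∧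
      ∀ t : List String, t ∈ pvGen fuel s i ↔
        (t.take i.toNat = s.take i.toNat ∧ (t.drop i.toNat).Perm (s.drop i.toNat)) := by
  intro fuel
  induction fuel with
  | zero =>
    intro s i hi hlen
    have hin : i.toNat = s.length := by omega
    refine ⟨by simp [pvGen], ?_⟩
    intro t
    simp only [pvGen, List.mem_singleton]
    constructor
    · rintro rfl; exact ⟨rfl, List.Perm.refl _⟩
    · rintro ⟨htake, hdrop⟩
      have hs : s.drop i.toNat = [] := by simp [hin]
      rw [hs] at hdrop
      have ht : t.drop i.toNat = [] := hdrop.eq_nil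
      have htt : t = t.take i.toNat ++ t.drop i.toNat := (List.take_append_drop _ _).symm
      rw [ht, List.append_nil] at htt
      rw [htt, htake, hin, List.take_length]
  | succ fuel ih =>
    intro s i hi hlen
    have hpn : i.toNat < s.length := by omega
    have hgen : pvGen (fuel + 1) s i
        = (pvSel s (PySem.List.pyRange i (s.length : Int) 1) PySem.Set.empty).flatMap
            (fun j => pvGen fuel (pvSwap s i j) (i + 1)) := rfl
    have hrange : ∀ j ∈ pvSel s (PySem.List.pyRange i (s.length : Int) 1) PySem.Set.empty,
        i ≤ j ∧ j < (s.length : Int) := fun j hj =>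
      PySem.List.mem_pyRange_one.mp (pvSel_subset hj)
    have hsuc : (i + 1).toNat = i.toNat + 1 := by omega
    have hbranch : ∀ j, i ≤ j → j < (s.length : Int) → ∀ t,
        t ∈ pvGen fuel (pvSwap s i j) (i + 1) ↔
        (t.take (i.toNat + 1) = (pvSwap s i j).take (i.toNat + 1) ∧
          (t.drop (i.toNat + 1)).Perm ((pvSwap s i j).drop (i.toNat + 1))) := by
      intro j hij hjn t
      have hswlen : ((pvSwap s i j).length : Int) = (i + 1) + fuel := by
        rw [pvSwap_length]; omega
      have := (ih (pvSwap s i j) (i + 1) (by omega) hswlen).2 t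
      rwa [hsuc] at this
    have hbranchnd : ∀ j, i ≤ j → j < (s.length : Int) →
        (pvGen fuel (pvSwap s i j) (i + 1)).Nodup := by
      intro j hij hjn
      have hswlen : ((pvSwap s i j).length : Int) = (i + 1) + fuel := by
        rw [pvSwap_length]; omega
      exact (ih (pvSwap s i j) (i + 1) (by omega) hswlen).1
    have hswget : ∀ j, i ≤ j → j < (s.length : Int) →
        ∃ (hpsw : i.toNat < (pvSwap s i j).length), (pvSwap s i j)[i.toNat] = pvVal s j := by
      intro j hij hjn
      have hpsw : i.toNat < (pvSwap s i j).length := by rw [pvSwap_length]; omega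
      refine ⟨hpsw, ?_⟩
      have h1 := List.drop_eq_getElem_cons hpsw
      have h2 := pvSwap_drop_cons s hi hij hjn
      rw [h1] at h2
      have h3 := congrArg (fun l => l.headD "") h2
      simp only [List.headD_cons] at h3
      exact h3
    have hbranchget : ∀ j, i ≤ j → j < (s.length : Int) → ∀ t,
        t ∈ pvGen fuel (pvSwap s i j) (i + 1) →
        t.length = s.length ∧ t.take i.toNat = s.take i.toNat ∧
          ∃ (hpt : i.toNat < t.length), t[i.toNat] = pvVal s j := by
      intro j hij hjn t ht
      obtain ⟨htake1, hdrop1⟩ := (hbranch j hij hjn t).mp ht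
      have hswl : (pvSwap s i j).length = s.length := pvSwap_length s i j
      have htlen : t.length = (pvSwap s i j).length := pvLenEq htake1 hdrop1 (by omega)
      have hpt : i.toNat < t.length := by omega
      obtain ⟨hpsw, hgetsw⟩ := hswget j hij hjn
      have htp : t[i.toNat] = pvVal s j := by
        have h1 : t[i.toNat]? = (t.take (i.toNat + 1))[i.toNat]? :=
          (List.getElem?_take_of_lt (Nat.lt_succ_self _)).symm
        rw [htake1, List.getElem?_take_of_lt (Nat.lt_succ_self _)] at h1
        rw [List.getElem?_eq_getElem hpt, List.getElem?_eq_getElem hpsw] at h1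
        rw [Option.some_inj] at h1
        rw [h1, hgetsw]
      have htkp : t.take i.toNat = s.take i.toNat := by
        have hcong := congrArg (List.take i.toNat) htake1
        rw [List.take_take, List.take_take, Nat.min_eq_left (Nat.le_succ _)] at hcong
        rw [hcong]
        exact pvSwap_take s hi hij
      exact ⟨by omega, htkp, hpt, htp⟩
    constructor
    · -- Nodup
      rw [hgen, List.nodup_flatMap]
      constructor
      · intro j hj
        obtain ⟨hij, hjn⟩ := hrange j hj
        exact hbranchnd j hij hjn
      · have hvals := (pvSel_strong s (PySem.List.pyRange i (s.length : Int) 1)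
          PySem.Set.empty).2
        have hpw : List.Pairwise (fun j j' => pvVal s j ≠ pvVal s j')
            (pvSel s (PySem.List.pyRange i (s.length : Int) 1) PySem.Set.empty) := by
          simp only [List.Nodup] at hvals
          rw [List.pairwise_map] at hvals
          exact hvals
        refine List.Pairwise.imp_of_mem ?_ hpw
        intro j j' hj hj' hne
        rw [Function.onFun, List.disjoint_left]
        intro t ht ht'
        obtain ⟨hij, hjn⟩ := hrange j hj
        obtain ⟨hij', hjn'⟩ := hrange j' hj'
        obtain ⟨_, _, hpt, htp⟩ := hbranchget j hij hjn t ht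
        obtain ⟨_, _, hpt', htp'⟩ := hbranchget j' hij' hjn' t ht'
        exact hne (htp ▸ htp' ▸ rfl)
    · -- membership
      intro t
      rw [hgen, List.mem_flatMap]
      constructor
      · rintro ⟨j, hj, ht⟩
        obtain ⟨hij, hjn⟩ := hrange j hj
        obtain ⟨htlen, htkp, hpt, htp⟩ := hbranchget j hij hjn t ht
        obtain ⟨htake1, hdrop1⟩ := (hbranch j hij hjn t).mp ht
        refine ⟨htkp, ?_⟩
        have h1 : t.drop i.toNat = t[i.toNat] :: t.drop (i.toNat + 1) :=
          List.drop_eq_getElem_cons hpt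
        have h2 := pvSwap_drop_cons s hi hij hjn
        have h3 := pvSwap_drop_perm s hi hij hjn
        rw [h1, htp]
        have hc : (pvVal s j :: t.drop (i.toNat + 1)).Perm ((pvSwap s i j).drop i.toNat) := by
          rw [h2]
          exact List.Perm.cons _ hdrop1
        exact hc.trans h3
      · rintro ⟨htake, hdrop⟩
        have hplen : i.toNat ≤ t.length := by
          have := congrArg List.length htake
          simp [List.length_take] at this
          omega
        have htlen : t.length = s.length := pvLenEq htake hdrop (by omega)
        have hpt : i.toNat < t.length := by omega
        have h1 : t.drop i.toNat = t[i.toNat] :: t.drop (i.toNat + 1) :=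
          List.drop_eq_getElem_cons hpt
        have hvmem : t[i.toNat] ∈ s.drop i.toNat := by
          have : t[i.toNat] ∈ t.drop i.toNat := by rw [h1]; exact List.mem_cons_self
          exact hdrop.mem_iff.mp this
        obtain ⟨k, hk, hkv⟩ := List.mem_iff_getElem.mp hvmem
        have hkn : i.toNat + k < s.length := by
          simp [List.length_drop] at hk
          omega
        have hq : (i + k : Int) ∈ PySem.List.pyRange i (s.length : Int) 1 := by
          rw [PySem.List.mem_pyRange_one]
          omega
        have hqval : pvVal s (i + k) = t[i.toNat] := by
          unfold pvVal
          rw [PySem.List.pyGetD_of_nonneg _ _ (by omega)]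
          have : ((i + k : Int)).toNat = i.toNat + k := by omega
          rw [this, List.getD_eq_getElem _ _ hkn]
          rw [← hkv]
          simp [List.getElem_drop]
        rcases pvSel_cover s (PySem.List.pyRange i (s.length : Int) 1) PySem.Set.empty
            (i + k) hq with hvis | ⟨j', hj', hv⟩
        · simp [PySem.Set.empty] at hvis
        · obtain ⟨hij', hjn'⟩ := hrange j' hj'
          refine ⟨j', hj', ?_⟩
          rw [hbranch j' hij' hjn' t]
          have hv' : pvVal s j' = t[i.toNat] := hv.trans hqval
          obtain ⟨hpsw, hgetsw⟩ := hswget j' hij' hjn'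
          have hswl : (pvSwap s i j').length = s.length := pvSwap_length s i j'
          have hswtake := pvSwap_take s hi hij'
          have hdropsw := pvSwap_drop_perm s hi hij' hjn'
          have hconssw := pvSwap_drop_cons s hi hij' hjn'
          constructor
          · rw [pvTakeSucc hpt, pvTakeSucc hpsw, htake, hswtake, hgetsw, hv']
          · have hch : (t[i.toNat] :: t.drop (i.toNat + 1)).Perm
                (t[i.toNat] :: (pvSwap s i j').drop (i.toNat + 1)) := by
              rw [← h1]
              refine hdrop.trans ?_
              refine hdropsw.symm.trans ?_
              rw [hconssw, hv']
            exact hch.cons_inv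

theorem pvGen_mem_facts {fuel : Nat} {s : List String} {i : Int} (hi : 0 ≤ i)
    (hlen : (s.length : Int) = i + fuel) {t : List String} (ht : t ∈ pvGen fuel s i) :
    t.length = s.length ∧ ∀ k : Nat, k < i.toNat → t.getD k "" = s.getD k "" := by
  obtain ⟨htake, hdrop⟩ := ((pvGen_spec fuel s i hi hlen).2 t).mp ht
  exact ⟨pvLenEq htake hdrop (by omega), fun k hk => pvGetEq "" htake hk⟩

-- ---- loop lemma ----

theorem pvProcess_loop (s : List String) (i : Int) (fuel : Nat) :
    ∀ (js : List Int) (vis : PySem.Set String) (ans : List String),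
      ((js.foldl
        (fun (st : PySem.Set String × List String) j =>
          if st.1.contains (PySem.List.pyGetD s j "") = false then
            (st.1.add (PySem.List.pyGetD s j ""),
             pvProcess fuel (pvSwap s i j) (i + 1) st.2)
          else st)
        (vis, ans)).2)
      = (pvSel s js vis).foldl (fun acc j => pvProcess fuel (pvSwap s i j) (i + 1) acc) ans := by
  intro js
  induction js with
  | nil => intro vis ans; simp [pvSel]
  | cons j0 r ih =>
    intro vis ans
    rw [List.foldl_cons]
    unfold pvSel
    by_cases hc : vis.contains (pvVal s j0) = true
    · rw [if_pos hc]
      have : vis.contains (PySem.List.pyGetD s j0 "") = false → False := by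
        intro h; rw [pvVal] at hc; rw [hc] at h; cases h
      rw [if_neg this]
      exact ih vis ans
    · have hc' : vis.contains (pvVal s j0) = false := by
        cases h : vis.contains (pvVal s j0)
        · rfl
        · exact absurd h hc
      rw [if_neg hc]
      rw [if_pos (by rw [pvVal] at hc'; exact hc')]
      rw [List.foldl_cons]
      exact ih (vis.add (pvVal s j0)) _

-- ---- pruned process = filtered generator ----

theorem pvProcess_zero (s : List String) (i : Int) (ans : List String) :
    pvProcess 0 s i ans =
      if i = 1 ∧ "2" < PySem.List.pyGetD s 0 "" then ans
      else if i = 2 ∧ PySem.List.pyGetD s 0 "" = "2" ∧ "4" < PySem.List.pyGetD s 1 "" then ans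
      else if i = 3 ∧ "5" < PySem.List.pyGetD s 2 "" then ans
      else if (s.length : Int) = i then ans ++ [PySem.Str.join "" s]
      else ans := rfl

theorem pvProcess_succ (fuel : Nat) (s : List String) (i : Int) (ans : List String) :
    pvProcess (fuel + 1) s i ans =
      if i = 1 ∧ "2" < PySem.List.pyGetD s 0 "" then ans
      else if i = 2 ∧ PySem.List.pyGetD s 0 "" = "2" ∧ "4" < PySem.List.pyGetD s 1 "" then ans
      else if i = 3 ∧ "5" < PySem.List.pyGetD s 2 "" then ans
      else if (s.length : Int) = i then ans ++ [PySem.Str.join "" s]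
      else
        ((PySem.List.pyRange i (s.length : Int) 1).foldl
          (fun (st : PySem.Set String × List String) j =>
            if st.1.contains (PySem.List.pyGetD s j "") = false then
              (st.1.add (PySem.List.pyGetD s j ""),
               pvProcess fuel (pvSwap s i j) (i + 1) st.2)
            else st)
          ((PySem.Set.empty : PySem.Set String), ans)).2 := rfl

theorem pvGen_succ_def (fuel : Nat) (s : List String) (i : Int) :
    pvGen (fuel + 1) s i
      = (pvSel s (PySem.List.pyRange i (s.length : Int) 1) PySem.Set.empty).flatMap
          (fun j => pvGen fuel (pvSwap s i j) (i + 1)) := rfl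

theorem pvC1_congr {t s : List String} (h : t.getD 0 "" = s.getD 0 "") : pvC1 t = pvC1 s := by
  unfold pvC1
  rw [PySem.List.pyGetD_of_nonneg _ _ (by norm_num), PySem.List.pyGetD_of_nonneg _ _ (by norm_num)]
  simp only [show ((0 : Int)).toNat = 0 from rfl, h]

theorem pvC2_congr {t s : List String} (h0 : t.getD 0 "" = s.getD 0 "")
    (h1 : t.getD 1 "" = s.getD 1 "") : pvC2 t = pvC2 s := by
  unfold pvC2
  rw [PySem.List.pyGetD_of_nonneg _ _ (by norm_num), PySem.List.pyGetD_of_nonneg _ _ (by norm_num),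
    PySem.List.pyGetD_of_nonneg _ _ (by norm_num), PySem.List.pyGetD_of_nonneg _ _ (by norm_num)]
  simp only [show ((0 : Int)).toNat = 0 from rfl, show ((1 : Int)).toNat = 1 from rfl, h0, h1]

theorem pvC3_congr {t s : List String} (h2 : t.getD 2 "" = s.getD 2 "") : pvC3 t = pvC3 s := by
  unfold pvC3
  rw [PySem.List.pyGetD_of_nonneg _ _ (by norm_num), PySem.List.pyGetD_of_nonneg _ _ (by norm_num)]
  simp only [show ((2 : Int)).toNat = 2 from rfl, h2]

theorem pvCond_zero (t : List String) : pvCond 0 t = pvCond 1 t := by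
  norm_num [pvCond]

theorem pvCond_one (t : List String) : pvCond 1 t = (pvC1 t && pvCond 2 t) := by
  norm_num [pvCond]

theorem pvCond_two (t : List String) : pvCond 2 t = (pvC2 t && pvCond 3 t) := by
  norm_num [pvCond]

theorem pvCond_three (t : List String) : pvCond 3 t = (pvC3 t && pvCond 4 t) := by
  norm_num [pvCond]

theorem pvCond_four (t : List String) : pvCond 4 t = true := by
  norm_num [pvCond]

theorem pvPass (fuel : Nat) (s : List String) (i : Int) (ans : List String)
    (hs : s.length = 4)
    (ih : ∀ (s' : List String) (i' : Int) (ans' : List String),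
        s'.length = 4 → 0 ≤ i' → i' + (fuel : Int) = 4 →
        pvProcess fuel s' i' ans'
          = ans' ++ ((pvGen fuel s' i').filter (pvCond i')).map (PySem.Str.join ""))
    (hi : 0 ≤ i) (hf : i + ((fuel : Int) + 1) = 4)
    (hcond : ∀ j : Int, i ≤ j → j < (s.length : Int) →
        ∀ t ∈ pvGen fuel (pvSwap s i j) (i + 1), pvCond (i + 1) t = pvCond i t) :
    ((PySem.List.pyRange i (s.length : Int) 1).foldl
        (fun (st : PySem.Set String × List String) j =>
          if st.1.contains (PySem.List.pyGetD s j "") = false then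
            (st.1.add (PySem.List.pyGetD s j ""),
             pvProcess fuel (pvSwap s i j) (i + 1) st.2)
          else st)
        ((PySem.Set.empty : PySem.Set String), ans)).2
      = ans ++ ((pvGen (fuel + 1) s i).filter (pvCond i)).map (PySem.Str.join "") := by
  rw [pvProcess_loop s i fuel]
  have hcg := PySem.List.foldl_congr_mem
    (pvSel s (PySem.List.pyRange i (s.length : Int) 1) PySem.Set.empty)
    (fun acc j => pvProcess fuel (pvSwap s i j) (i + 1) acc)
    (fun acc j => acc ++ ((pvGen fuel (pvSwap s i j) (i + 1)).filter (pvCond (i + 1))).map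
      (PySem.Str.join ""))
    ans
    (fun acc j _ => ih (pvSwap s i j) (i + 1) acc (by rw [pvSwap_length]; exact hs)
      (by omega) (by omega))
  rw [hcg, PySem.List.foldl_append_eq_flatMap]
  rw [pvGen_succ_def, List.filter_flatMap, List.map_flatMap]
  congr 1
  apply List.flatMap_congr
  intro j hj
  obtain ⟨hij, hjn⟩ := PySem.List.mem_pyRange_one.mp (pvSel_subset hj)
  congr 1
  apply List.filter_congr
  intro t ht
  exact hcond j hij hjn t ht

theorem pvPrefix {fuel : Nat} {s : List String} {i j : Int} (hs : s.length = 4)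
    (hi : 0 ≤ i) (hij : i ≤ j) (hjn : j < (s.length : Int)) (hf : i + ((fuel : Int) + 1) = 4)
    {t : List String} (ht : t ∈ pvGen fuel (pvSwap s i j) (i + 1)) :
    ∀ k : Nat, k < i.toNat → t.getD k "" = s.getD k "" := by
  intro k hk
  have hswlen : ((pvSwap s i j).length : Int) = (i + 1) + fuel := by
    rw [pvSwap_length]; omega
  have hfacts := pvGen_mem_facts (by omega) hswlen ht
  have h1 : t.getD k "" = (pvSwap s i j).getD k "" := hfacts.2 k (by omega)
  have h2 : (pvSwap s i j).getD k "" = s.getD k "" :=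
    pvGetEq "" (pvSwap_take s hi hij) hk
  rw [h1, h2]

theorem pvProcess_eq : ∀ (fuel : Nat) (s : List String) (i : Int) (ans : List String),
    s.length = 4 → 0 ≤ i → i + fuel = 4 →
    pvProcess fuel s i ans
      = ans ++ ((pvGen fuel s i).filter (pvCond i)).map (PySem.Str.join "") := by
  intro fuel
  induction fuel with
  | zero =>
    intro s i ans hs hi hf
    have h4 : i = 4 := by omega
    subst h4
    rw [pvProcess_zero]
    rw [if_neg (by norm_num), if_neg (by norm_num), if_neg (by norm_num),
      if_pos (by rw [hs]; norm_num)]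
    have hc := pvCond_four s
    simp [pvGen, hc]
  | succ fuel ih =>
    intro s i ans hs hi hf
    have hlen : (s.length : Int) = i + (fuel + 1) := by rw [hs]; push_cast at hf ⊢; omega
    have hle : fuel ≤ 3 := by omega
    interval_cases fuel
    · -- fuel = 0, i = 3
      have h3 : i = 3 := by omega
      subst h3
      rw [pvProcess_succ]
      rw [if_neg (by norm_num), if_neg (by norm_num)]
      by_cases hc : "5" < PySem.List.pyGetD s 2 ""
      · rw [if_pos ⟨rfl, hc⟩]
        have hnil : ∀ t ∈ pvGen 1 s 3, ¬ (pvCond 3 t = true) := by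
          intro t ht
          have hfacts := pvGen_mem_facts (by norm_num) (by rw [hlen]; norm_num) ht
          have hg : t.getD 2 "" = s.getD 2 "" := hfacts.2 2 (by norm_num)
          rw [pvCond_three, pvC3_congr hg]
          have hc3 : pvC3 s = false := by simp [pvC3, hc]
          simp [hc3]
        rw [List.filter_eq_nil_iff.mpr hnil]
        simp
      · rw [if_neg (by rintro ⟨_, h⟩; exact hc h)]
        rw [if_neg (by rw [hs]; norm_num)]
        rw [pvPass 0 s 3 ans hs ih (by norm_num) (by norm_num) ?_]
        intro j hij hjn t ht
        have hg : t.getD 2 "" = s.getD 2 "" :=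
          pvPrefix hs (by norm_num) hij hjn (by norm_num) ht 2 (by norm_num)
        have hc3 : pvC3 s = true := by simp [pvC3, hc]
        rw [show (3 : Int) + 1 = 4 by norm_num, pvCond_three, pvC3_congr hg, hc3,
          Bool.true_and]
    · -- fuel = 1, i = 2
      have h2 : i = 2 := by omega
      subst h2
      rw [pvProcess_succ]
      rw [if_neg (by norm_num)]
      by_cases hc : PySem.List.pyGetD s 0 "" = "2" ∧ "4" < PySem.List.pyGetD s 1 ""
      · rw [if_pos ⟨rfl, hc⟩]
        have hnil : ∀ t ∈ pvGen 2 s 2, ¬ (pvCond 2 t = true) := by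
          intro t ht
          have hfacts := pvGen_mem_facts (by norm_num) (by rw [hlen]; norm_num) ht
          have hg0 : t.getD 0 "" = s.getD 0 "" := hfacts.2 0 (by norm_num)
          have hg1 : t.getD 1 "" = s.getD 1 "" := hfacts.2 1 (by norm_num)
          rw [pvCond_two, pvC2_congr hg0 hg1]
          have hc2 : pvC2 s = false := by simp [pvC2, hc.1, hc.2]
          simp [hc2]
        rw [List.filter_eq_nil_iff.mpr hnil]
        simp
      · rw [if_neg (by rintro ⟨_, h⟩; exact hc h)]
        rw [if_neg (by norm_num), if_neg (by rw [hs]; norm_num)]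
        rw [pvPass 1 s 2 ans hs ih (by norm_num) (by norm_num) ?_]
        intro j hij hjn t ht
        have hg0 : t.getD 0 "" = s.getD 0 "" :=
          pvPrefix hs (by norm_num) hij hjn (by norm_num) ht 0 (by norm_num)
        have hg1 : t.getD 1 "" = s.getD 1 "" :=
          pvPrefix hs (by norm_num) hij hjn (by norm_num) ht 1 (by norm_num)
        have hc2 : pvC2 s = true := by unfold pvC2; rw [decide_eq_false hc]; rfl
        rw [show (2 : Int) + 1 = 3 by norm_num, pvCond_two, pvC2_congr hg0 hg1, hc2,
          Bool.true_and]
    · -- fuel = 2, i = 1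
      have h1 : i = 1 := by omega
      subst h1
      rw [pvProcess_succ]
      by_cases hc : "2" < PySem.List.pyGetD s 0 ""
      · rw [if_pos ⟨rfl, hc⟩]
        have hnil : ∀ t ∈ pvGen 3 s 1, ¬ (pvCond 1 t = true) := by
          intro t ht
          have hfacts := pvGen_mem_facts (by norm_num) (by rw [hlen]; norm_num) ht
          have hg : t.getD 0 "" = s.getD 0 "" := hfacts.2 0 (by norm_num)
          rw [pvCond_one, pvC1_congr hg]
          have hc1 : pvC1 s = false := by simp [pvC1, hc]
          simp [hc1]
        rw [List.filter_eq_nil_iff.mpr hnil]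
        simp
      · rw [if_neg (by rintro ⟨_, h⟩; exact hc h)]
        rw [if_neg (by norm_num), if_neg (by norm_num), if_neg (by rw [hs]; norm_num)]
        rw [pvPass 2 s 1 ans hs ih (by norm_num) (by norm_num) ?_]
        intro j hij hjn t ht
        have hg : t.getD 0 "" = s.getD 0 "" :=
          pvPrefix hs (by norm_num) hij hjn (by norm_num) ht 0 (by norm_num)
        have hc1 : pvC1 s = true := by simp [pvC1, hc]
        rw [show (1 : Int) + 1 = 2 by norm_num, pvCond_one, pvC1_congr hg, hc1,
          Bool.true_and]
    · -- fuel = 3, i = 0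
      have h0 : i = 0 := by omega
      subst h0
      rw [pvProcess_succ]
      rw [if_neg (by norm_num), if_neg (by norm_num), if_neg (by norm_num),
        if_neg (by rw [hs]; norm_num)]
      rw [pvPass 3 s 0 ans hs ih (by norm_num) (by norm_num) ?_]
      intro j hij hjn t ht
      rw [show (0 : Int) + 1 = 1 by norm_num, pvCond_zero]

-- ---- set-fold facts (B's accumulation loop) ----

theorem pvFoldSet_mem {α β : Type} [BEq β] [LawfulBEq β] (cond : α → Bool) (f : α → β) :
    ∀ (l : List α) (v : PySem.Set β) (x : β),
      x ∈ l.foldl (fun v p => if cond p then PySem.Set.add v (f p) else v) v ↔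
        x ∈ v ∨ ∃ p ∈ l, cond p = true ∧ f p = x := by
  intro l
  induction l with
  | nil => simp
  | cons p r ih =>
    intro v x
    rw [List.foldl_cons]
    by_cases hq : cond p = true
    · rw [if_pos hq, ih]
      rw [PySem.Set.mem_add]
      constructor
      · rintro ((h | rfl) | ⟨p', hm, hx⟩)
        · exact Or.inl h
        · exact Or.inr ⟨p, List.mem_cons_self, hq, rfl⟩
        · exact Or.inr ⟨p', List.mem_cons_of_mem _ hm, hx⟩
      · rintro (h | ⟨p', hm, hc, hx⟩)
        · exact Or.inl (Or.inl h)
        · rcases List.mem_cons.mp hm with rfl | hm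
          · exact Or.inl (Or.inr hx.symm)
          · exact Or.inr ⟨p', hm, hc, hx⟩
    · rw [if_neg hq, ih]
      constructor
      · rintro (h | ⟨p', hm, hc, hx⟩)
        · exact Or.inl h
        · exact Or.inr ⟨p', List.mem_cons_of_mem _ hm, hc, hx⟩
      · rintro (h | ⟨p', hm, hc, hx⟩)
        · exact Or.inl h
        · rcases List.mem_cons.mp hm with rfl | hm
          · exact absurd hc hq
          · exact Or.inr ⟨p', hm, hc, hx⟩

theorem pvFoldSet_nodup {α β : Type} [BEq β] [LawfulBEq β] (cond : α → Bool) (f : α → β) :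
    ∀ (l : List α) (v : PySem.Set β), v.Nodup →
      (l.foldl (fun v p => if cond p then PySem.Set.add v (f p) else v) v).Nodup := by
  intro l
  induction l with
  | nil => intro v hv; simpa
  | cons p r ih =>
    intro v hv
    rw [List.foldl_cons]
    by_cases hq : cond p = true
    · rw [if_pos hq]; exact ih _ (PySem.Set.nodup_add _ _ hv)
    · rw [if_neg hq]; exact ih _ hv

-- ---- permutations bridge ----

theorem pvPerms_eq (a b c d : String) :
    PySem.List.permutations [a, b, c, d] 4 = pvPerms a b c d := by
  simp [PySem.List.permutations_succ, PySem.List.permutations_zero, List.range_succ, pvPerms]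

theorem pvMem_permutations_of_perm {α : Type} [DecidableEq α] :
    ∀ (t xs : List α), t.Perm xs → t ∈ PySem.List.permutations xs xs.length := by
  intro t
  induction t with
  | nil =>
    intro xs h
    have : xs = [] := h.symm.eq_nil
    subst this
    simp [PySem.List.permutations_zero]
  | cons v t' ihp =>
    intro xs h
    obtain ⟨hv, hperm⟩ := List.cons_perm_iff_perm_erase.mp h
    have hlen : xs.length = t'.length + 1 := by
      have := h.length_eq
      simpa using this.symm
    have hidx : xs.idxOf v < xs.length := List.idxOf_lt_length_of_mem hv
    have hget : xs[xs.idxOf v]? = some v := List.getElem?_idxOf hv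
    have herase : xs.erase v = xs.eraseIdx (xs.idxOf v) :=
      List.erase_eq_eraseIdx_of_idxOf rfl
    have hrec : t' ∈ PySem.List.permutations (xs.eraseIdx (xs.idxOf v))
        (xs.eraseIdx (xs.idxOf v)).length := by
      apply ihp
      rw [← herase]
      exact hperm
    have helen : (xs.eraseIdx (xs.idxOf v)).length = t'.length := by
      rw [List.length_eraseIdx_of_lt hidx]
      omega
    rw [hlen, PySem.List.permutations_succ, List.mem_flatMap]
    refine ⟨xs.idxOf v, List.mem_range.mpr hidx, ?_⟩
    rw [hget]
    rw [List.mem_map]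
    refine ⟨t', ?_, rfl⟩
    rwa [helen] at hrec

theorem pvPerm_iff_mem_pvPerms (a b c d : String) (t : List String) :
    t.Perm [a, b, c, d] ↔ t ∈ pvPerms a b c d := by
  constructor
  · intro h
    have := pvMem_permutations_of_perm t [a, b, c, d] h
    rwa [show ([a, b, c, d] : List String).length = 4 from rfl, pvPerms_eq] at this
  · intro h
    have := PySem.List.perm_of_mem_permutations (xs := [a, b, c, d]) (p := t)
    rw [show ([a, b, c, d] : List String).length = 4 from rfl, pvPerms_eq] at this
    exact this h

theorem pvList4 (t : List String) (h : t.length = 4) :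
    t = [t.getD 0 "", t.getD 1 "", t.getD 2 "", t.getD 3 ""] := by
  match t, h with
  | [w, x, y, z], _ => rfl

theorem pvCond_bridge (t : List String) : pvQb (pvToT t) = pvCond 0 t := by
  have hiff : (pvQb (pvToT t) = true) ↔ (pvCond 0 t = true) := by
    unfold pvQb pvToT pvCond pvC1 pvC2 pvC3
    have h0 : PySem.List.pyGetD t (0 : Int) "" = t.getD 0 "" := by
      rw [PySem.List.pyGetD_of_nonneg _ _ (by norm_num)]; rfl
    have h1 : PySem.List.pyGetD t (1 : Int) "" = t.getD 1 "" := by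
      rw [PySem.List.pyGetD_of_nonneg _ _ (by norm_num)]; rfl
    have h2 : PySem.List.pyGetD t (2 : Int) "" = t.getD 2 "" := by
      rw [PySem.List.pyGetD_of_nonneg _ _ (by norm_num)]; rfl
    rw [h0, h1, h2]
    norm_num
    try tauto
  cases h1 : pvQb (pvToT t) <;> cases h2 : pvCond 0 t <;> simp_all

-- ---- main count lemma over strings ----

theorem pvAlt_def (A B C D : Int) :
    solution_alt A B C D
      = PySem.Set.len (pvValid (PySem.Int.toStr A) (PySem.Int.toStr B) (PySem.Int.toStr C)
          (PySem.Int.toStr D)) := rfl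

theorem pvValid_eq_fold (a b c d : String) :
    pvValid a b c d
      = pvQuads.foldl
          (fun v q => if pvDistinctb q && pvQb (pvTup a b c d q) then
            PySem.Set.add v (pvTup a b c d q) else v)
          (PySem.Set.empty : PySem.Set (String × String × String × String)) := by
  unfold pvValid pvQuads
  rw [show PySem.List.pyRange 0 4 1 = ([0, 1, 2, 3] : List Int) from by decide]
  simp only [List.foldl_flatMap, List.foldl_map]
  apply PySem.List.foldl_congr_mem
  intro v1 i _
  apply PySem.List.foldl_congr_mem
  intro v2 j _
  apply PySem.List.foldl_congr_mem
  intro v3 k _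
  apply PySem.List.foldl_congr_mem
  intro v4 l _
  dsimp only
  by_cases hg : PySem.Set.len (PySem.Set.ofList [i, j, k, l]) = 4
  · by_cases hq : PySem.List.pyGetD [a, b, c, d] i "" ≤ "2" ∧
        ¬ (PySem.List.pyGetD [a, b, c, d] i "" = "2" ∧
          "4" < PySem.List.pyGetD [a, b, c, d] j "") ∧
        PySem.List.pyGetD [a, b, c, d] k "" ≤ "5"
    · have hb : (pvDistinctb (i, j, k, l) && pvQb (pvTup a b c d (i, j, k, l))) = true := by
        rw [Bool.and_eq_true]
        exact ⟨decide_eq_true hg, decide_eq_true hq⟩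
      rw [if_pos hg, if_pos hq, if_pos hb]
      rfl
    · have hb : ¬ ((pvDistinctb (i, j, k, l) && pvQb (pvTup a b c d (i, j, k, l))) = true) := by
        rw [Bool.and_eq_true]
        rintro ⟨-, h2⟩
        exact hq (of_decide_eq_true h2)
      rw [if_pos hg, if_neg hq, if_neg hb]
  · have hb : ¬ ((pvDistinctb (i, j, k, l) && pvQb (pvTup a b c d (i, j, k, l))) = true) := by
      rw [Bool.and_eq_true]
      rintro ⟨h1, -⟩
      exact hg (of_decide_eq_true h1)
    rw [if_neg hg, if_neg hb]

set_option maxRecDepth 8192 in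
theorem pvQuadPerm : ∀ p ∈ pvQuads, pvDistinctb p = true →
    ([p.1, p.2.1, p.2.2.1, p.2.2.2] : List Int).Perm [0, 1, 2, 3] := by decide

theorem pvMain (a b c d : String) :
    ((pvProcess 4 [a, b, c, d] 0 []).length : Int) = PySem.Set.len (pvValid a b c d) := by
  have hA := pvProcess_eq 4 [a, b, c, d] 0 [] rfl (by norm_num) (by norm_num)
  have hspec := pvGen_spec 4 [a, b, c, d] 0 (by norm_num) (by norm_num)
  have hFmem : ∀ t, t ∈ (pvGen 4 [a, b, c, d] 0).filter (pvCond 0) ↔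
      (t.Perm [a, b, c, d] ∧ pvCond 0 t = true) := by
    intro t
    rw [List.mem_filter]
    constructor
    · rintro ⟨hm, hcnd⟩
      refine ⟨?_, hcnd⟩
      have := (hspec.2 t).mp hm
      simpa using this.2
    · rintro ⟨hp, hcnd⟩
      exact ⟨(hspec.2 t).mpr ⟨by simp, by simpa using hp⟩, hcnd⟩
  have hFnd : ((pvGen 4 [a, b, c, d] 0).filter (pvCond 0)).Nodup := hspec.1.filter _
  have hmapnd : (((pvGen 4 [a, b, c, d] 0).filter (pvCond 0)).map pvToT).Nodup := by
    refine List.Nodup.map_on ?_ hFnd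
    intro t1 h1 t2 h2 heq
    have l1 : t1.length = 4 := by
      have := ((hFmem t1).mp h1).1.length_eq; simpa using this
    have l2 : t2.length = 4 := by
      have := ((hFmem t2).mp h2).1.length_eq; simpa using this
    rw [pvList4 t1 l1, pvList4 t2 l2]
    simp only [pvToT, Prod.mk.injEq] at heq
    obtain ⟨e1, e2, e3, e4⟩ := heq
    rw [e1, e2, e3, e4]
  rw [pvValid_eq_fold]
  have hVnd := pvFoldSet_nodup (fun q => pvDistinctb q && pvQb (pvTup a b c d q))
    (pvTup a b c d) pvQuads PySem.Set.empty List.nodup_nil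
  have hVmem := pvFoldSet_mem (fun q => pvDistinctb q && pvQb (pvTup a b c d q))
    (pvTup a b c d) pvQuads PySem.Set.empty
  have hsame : ∀ q, q ∈ ((pvGen 4 [a, b, c, d] 0).filter (pvCond 0)).map pvToT ↔
      q ∈ pvQuads.foldl
        (fun v q => if pvDistinctb q && pvQb (pvTup a b c d q) then
          PySem.Set.add v (pvTup a b c d q) else v)
        (PySem.Set.empty : PySem.Set (String × String × String × String)) := by
    intro q
    rw [List.mem_map, hVmem q]
    simp only [PySem.Set.empty, List.not_mem_nil, false_or]
    constructor
    · rintro ⟨t, htF, rfl⟩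
      obtain ⟨hperm, hcond⟩ := (hFmem t).mp htF
      have hq : pvQb (pvToT t) = true := by rw [pvCond_bridge]; exact hcond
      have ht24 : t ∈ pvPerms a b c d := (pvPerm_iff_mem_pvPerms a b c d t).mp hperm
      simp only [pvPerms, List.mem_cons, List.not_mem_nil, or_false] at ht24
      rcases ht24 with rfl | rfl | rfl | rfl | rfl | rfl | rfl | rfl | rfl | rfl | rfl | rfl |
        rfl | rfl | rfl | rfl | rfl | rfl | rfl | rfl | rfl | rfl | rfl | rfl
      · exact ⟨(0, 1, 2, 3), by decide,
          by rw [Bool.and_eq_true]; exact ⟨by decide, hq⟩, rfl⟩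
      · exact ⟨(0, 1, 3, 2), by decide,
          by rw [Bool.and_eq_true]; exact ⟨by decide, hq⟩, rfl⟩
      · exact ⟨(0, 2, 1, 3), by decide,
          by rw [Bool.and_eq_true]; exact ⟨by decide, hq⟩, rfl⟩
      · exact ⟨(0, 2, 3, 1), by decide,
          by rw [Bool.and_eq_true]; exact ⟨by decide, hq⟩, rfl⟩
      · exact ⟨(0, 3, 1, 2), by decide,
          by rw [Bool.and_eq_true]; exact ⟨by decide, hq⟩, rfl⟩
      · exact ⟨(0, 3, 2, 1), by decide,
          by rw [Bool.and_eq_true]; exact ⟨by decide, hq⟩, rfl⟩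
      · exact ⟨(1, 0, 2, 3), by decide,
          by rw [Bool.and_eq_true]; exact ⟨by decide, hq⟩, rfl⟩
      · exact ⟨(1, 0, 3, 2), by decide,
          by rw [Bool.and_eq_true]; exact ⟨by decide, hq⟩, rfl⟩
      · exact ⟨(1, 2, 0, 3), by decide,
          by rw [Bool.and_eq_true]; exact ⟨by decide, hq⟩, rfl⟩
      · exact ⟨(1, 2, 3, 0), by decide,
          by rw [Bool.and_eq_true]; exact ⟨by decide, hq⟩, rfl⟩
      · exact ⟨(1, 3, 0, 2), by decide,
          by rw [Bool.and_eq_true]; exact ⟨by decide, hq⟩, rfl⟩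
      · exact ⟨(1, 3, 2, 0), by decide,
          by rw [Bool.and_eq_true]; exact ⟨by decide, hq⟩, rfl⟩
      · exact ⟨(2, 0, 1, 3), by decide,
          by rw [Bool.and_eq_true]; exact ⟨by decide, hq⟩, rfl⟩
      · exact ⟨(2, 0, 3, 1), by decide,
          by rw [Bool.and_eq_true]; exact ⟨by decide, hq⟩, rfl⟩
      · exact ⟨(2, 1, 0, 3), by decide,
          by rw [Bool.and_eq_true]; exact ⟨by decide, hq⟩, rfl⟩
      · exact ⟨(2, 1, 3, 0), by decide,
          by rw [Bool.and_eq_true]; exact ⟨by decide, hq⟩, rfl⟩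
      · exact ⟨(2, 3, 0, 1), by decide,
          by rw [Bool.and_eq_true]; exact ⟨by decide, hq⟩, rfl⟩
      · exact ⟨(2, 3, 1, 0), by decide,
          by rw [Bool.and_eq_true]; exact ⟨by decide, hq⟩, rfl⟩
      · exact ⟨(3, 0, 1, 2), by decide,
          by rw [Bool.and_eq_true]; exact ⟨by decide, hq⟩, rfl⟩
      · exact ⟨(3, 0, 2, 1), by decide,
          by rw [Bool.and_eq_true]; exact ⟨by decide, hq⟩, rfl⟩
      · exact ⟨(3, 1, 0, 2), by decide,
          by rw [Bool.and_eq_true]; exact ⟨by decide, hq⟩, rfl⟩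
      · exact ⟨(3, 1, 2, 0), by decide,
          by rw [Bool.and_eq_true]; exact ⟨by decide, hq⟩, rfl⟩
      · exact ⟨(3, 2, 0, 1), by decide,
          by rw [Bool.and_eq_true]; exact ⟨by decide, hq⟩, rfl⟩
      · exact ⟨(3, 2, 1, 0), by decide,
          by rw [Bool.and_eq_true]; exact ⟨by decide, hq⟩, rfl⟩
    · rintro ⟨p, hp, hcond, rfl⟩
      rw [Bool.and_eq_true] at hcond
      obtain ⟨hdist, hq⟩ := hcond
      have hperm4 := pvQuadPerm p hp hdist
      have htperm : (([p.1, p.2.1, p.2.2.1, p.2.2.2] : List Int).map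
          (fun x => PySem.List.pyGetD [a, b, c, d] x "")).Perm [a, b, c, d] := by
        have := hperm4.map (fun x => PySem.List.pyGetD [a, b, c, d] x "")
        rwa [show (([0, 1, 2, 3] : List Int).map
          (fun x => PySem.List.pyGetD [a, b, c, d] x "")) = [a, b, c, d] from rfl] at this
      refine ⟨([p.1, p.2.1, p.2.2.1, p.2.2.2] : List Int).map
        (fun x => PySem.List.pyGetD [a, b, c, d] x ""), ?_, rfl⟩
      rw [hFmem _]
      refine ⟨htperm, ?_⟩
      rw [← pvCond_bridge]
      exact hq
  have hperm := (List.perm_ext_iff_of_nodup hmapnd hVnd).mpr hsame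
  have hlen := hperm.length_eq
  rw [hA]
  rw [List.nil_append, List.length_map]
  rw [show PySem.Set.len (pvQuads.foldl
      (fun v q => if pvDistinctb q && pvQb (pvTup a b c d q) then
        PySem.Set.add v (pvTup a b c d q) else v)
      (PySem.Set.empty : PySem.Set (String × String × String × String)))
    = ((pvQuads.foldl
      (fun v q => if pvDistinctb q && pvQb (pvTup a b c d q) then
        PySem.Set.add v (pvTup a b c d q) else v)
      (PySem.Set.empty : PySem.Set (String × String × String × String))).length : Int)
    from rfl]
  rw [← hlen, List.length_map]

-- ===== VERDICT (by name: the statement is the Claim_ definition above) =====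
theorem solution_spec : Claim_equal_solution := by
  intro A B C D _
  unfold Spec_solution solution
  rw [pvAlt_def, ← pvMain]
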